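-- pv_equiv track=rewrite | github.com/rahulswimmer/scalar_assignments_hw | maximumabsolutedifference.py | solve
-- ===== SOURCE A (Python) =====
-- def solve(A):
--     ans=0
--     xi = []
--     yi = []
--
--     # for i in range(len(A)):
--     #     for j in range(len(A)):
--     #         if abs(A[i]-A[j])+abs(i-j) > ans:
--     #             ans = abs(A[i]-A[j])+abs(i-j)
--
--     for i in range(len(A)):
--         xi.append(A[i]+i)
--
--     for i in range(len(A)):
--         yi.append(A[i]-i)
--
--     for i in range(len(A)):
--         ans = max(max(xi)-min(xi),max(yi)-min(yi))
--     return ans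
--
-- A=[1,3,-1]
-- ===== SOURCE B (Python) =====
-- def solve(A):
--     if not A:
--         return 0
--     maxx = minx = A[0]
--     maxy = miny = A[0]
--     i = 1
--     for a in A[1:]:
--         x = a + i
--         y = a - i
--         if x > maxx:
--             maxx = x
--         if x < minx:
--             minx = x
--         if y > maxy:
--             maxy = y
--         if y < miny:
--             miny = y
--         i += 1
--     return max(maxx - minx, maxy - miny)
-- ===== Notes on version B (the rewrite author's own statement) =====
-- stated objective: faster
-- what changed: Single pass tracking running max/min of A[i]+i and A[i]-i instead of rebuilding the lists and recomputing max/min of both lists inside a loop over all indices.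
import Mathlib
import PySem

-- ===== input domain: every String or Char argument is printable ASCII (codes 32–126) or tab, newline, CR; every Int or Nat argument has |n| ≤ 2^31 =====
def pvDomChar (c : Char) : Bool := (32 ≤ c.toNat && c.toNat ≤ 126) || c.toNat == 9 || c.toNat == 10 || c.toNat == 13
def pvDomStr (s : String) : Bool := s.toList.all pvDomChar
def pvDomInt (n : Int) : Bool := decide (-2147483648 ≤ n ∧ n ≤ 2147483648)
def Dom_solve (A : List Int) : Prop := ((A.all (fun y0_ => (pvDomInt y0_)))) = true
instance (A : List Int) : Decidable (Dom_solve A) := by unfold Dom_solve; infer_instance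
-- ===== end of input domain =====

-- B replaces A's list-building plus quadratic loop (max/min recomputed every iteration) by one
-- single pass tracking the running max/min of A[i]+i and A[i]-i: asymptotically faster (O(n) vs O(n^2)).


-- ===== PORT A =====
-- Python max(xs)/min(xs) on a list: PySem.List.max?/min?; the final loop body only runs when
-- len(A) ≥ 1, where xi/yi are nonempty, so the .getD 0 default is never the result (exact there).
def solve (A : List Int) : Int :=
  let n : Int := PySem.List.len A
  let xi : List Int :=
    (PySem.List.pyRange 0 n 1).foldl (fun xs i => xs ++ [PySem.List.pyGetD A i 0 + i]) []
  let yi : List Int :=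
    (PySem.List.pyRange 0 n 1).foldl (fun ys i => ys ++ [PySem.List.pyGetD A i 0 - i]) []
  (PySem.List.pyRange 0 n 1).foldl
    (fun _ans _i =>
      max (((PySem.List.max? xi (fun y => y)).getD 0) - ((PySem.List.min? xi (fun y => y)).getD 0))
          (((PySem.List.max? yi (fun y => y)).getD 0) - ((PySem.List.min? yi (fun y => y)).getD 0)))
    0

-- ===== PORT B =====
-- the for-loop of Source B over A[1:], carrying (i, maxx, minx, maxy, miny), as structural recursion
def solveGo (l : List Int) (i maxx minx maxy miny : Int) : Int :=
  match l with
  | [] => max (maxx - minx) (maxy - miny)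
  | a :: t =>
      solveGo t (i + 1) (max maxx (a + i)) (min minx (a + i)) (max maxy (a - i)) (min miny (a - i))

def solve_alt (A : List Int) : Int :=
  match A with
  | [] => 0
  | a :: t => solveGo t 1 a a a a

-- ===== PRECONDITION & SPEC =====
def Spec_solve (A : List Int) (out : Int) : Prop := out = solve_alt A
instance (A : List Int) (out : Int) : Decidable (Spec_solve A out) := by unfold Spec_solve; infer_instance

-- ===== CLAIM (what is proved, stated in full; the proofs are below) =====
def Claim_equal_solve : Prop := ∀ (A : List Int), Dom_solve A → Spec_solve A (solve A)

-- ===== LEMMAS AND PROOFS =====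

-- append-fold builds the mapped list
theorem foldl_append_map {α β : Type} (f : α → β) :
    ∀ (l : List α) (init : List β),
      l.foldl (fun xs i => xs ++ [f i]) init = init ++ l.map f := by
  intro l
  induction l with
  | nil => simp
  | cons a t ih => intro init; simp [List.foldl, ih]

-- a constant-bodied fold over a nonempty list is that constant
theorem foldl_const {α : Type} (c : Int) :
    ∀ (l : List α) (init : Int), l ≠ [] → l.foldl (fun _ _ => c) init = c := by
  intro l
  induction l with
  | nil => intro _ h; exact absurd rfl h
  | cons a t ih =>
      intro init _
      cases t with
      | nil => simp [List.foldl]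
      | cons b u => simpa [List.foldl] using ih c (by simp)

-- solveGo computes max/min folds of the enumerated terms
theorem solveGo_eq (l : List Int) :
    ∀ (i maxx minx maxy miny : Int),
      solveGo l i maxx minx maxy miny =
        max (((PySem.List.enumerate l i).map (fun p => p.2 + p.1)).foldl max maxx -
             ((PySem.List.enumerate l i).map (fun p => p.2 + p.1)).foldl min minx)
            (((PySem.List.enumerate l i).map (fun p => p.2 - p.1)).foldl max maxy -
             ((PySem.List.enumerate l i).map (fun p => p.2 - p.1)).foldl min miny) := by
  induction l with
  | nil => intro i maxx minx maxy miny; simp [solveGo, PySem.List.enumerate_nil]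
  | cons a t ih =>
      intro i maxx minx maxy miny
      simp only [solveGo, PySem.List.enumerate_cons, List.map, List.foldl]
      exact ih (i + 1) (max maxx (a + i)) (min minx (a + i)) (max maxy (a - i)) (min miny (a - i))

theorem solve_spec_aux (A : List Int) : solve A = solve_alt A := by
  cases A with
  | nil => simp [solve, solve_alt, PySem.List.len]
  | cons a t =>
      have hne : PySem.List.pyRange 0 (PySem.List.len (a :: t)) 1 ≠ [] := by
        have : (0 : Int) ∈ PySem.List.pyRange 0 (PySem.List.len (a :: t)) 1 := by
          rw [PySem.List.mem_pyRange_one]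
          refine ⟨le_refl 0, ?_⟩
          simp [PySem.List.len]
        intro h; rw [h] at this; exact absurd this (List.not_mem_nil)
      have hxi : (PySem.List.pyRange 0 (PySem.List.len (a :: t)) 1).foldl
          (fun xs i => xs ++ [PySem.List.pyGetD (a :: t) i 0 + i]) [] =
          (PySem.List.enumerate (a :: t) 0).map (fun p => p.2 + p.1) := by
        rw [foldl_append_map]
        rw [PySem.List.enumerate_eq_map_pyRange (d := 0), List.map_map]
        simp [PySem.List.len]
      have hyi : (PySem.List.pyRange 0 (PySem.List.len (a :: t)) 1).foldl
          (fun ys i => ys ++ [PySem.List.pyGetD (a :: t) i 0 - i]) [] =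
          (PySem.List.enumerate (a :: t) 0).map (fun p => p.2 - p.1) := by
        rw [foldl_append_map]
        rw [PySem.List.enumerate_eq_map_pyRange (d := 0), List.map_map]
        simp [PySem.List.len]
      simp only [solve]
      rw [hxi, hyi, foldl_const _ _ _ hne]
      rw [PySem.List.enumerate_cons]
      simp only [List.map, PySem.List.max?_id_cons, PySem.List.min?_id_cons, Option.getD_some,
        add_zero, sub_zero]
      rw [solve_alt, solveGo_eq]
      simp

-- ===== VERDICT (by name: the statement is the Claim_ definition above) =====
theorem solve_spec : Claim_equal_solve := by
  intro A _
  unfold Spec_solve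
  exact solve_spec_aux A
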